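-- pv_equiv track=rewrite | github.com/OmarGonzalez-1/Automatas-Compiladores | Programa 2.py | clasificar_token
-- ===== SOURCE A (Python) =====
-- def clasificar_token(token):
--     if token.isdigit():
--         return "entero"
--     elif token.isalpha():
--         return "palabra"
--     elif any(c.isalpha() for c in token) and any(c.isdigit() for c in token):
--         return "compuesta"
--     else:
--         return "otro"
-- ===== SOURCE B (Python) =====
-- def clasificar_token(token):
--     kinds = {('d' if c.isdigit() else 'a' if c.isalpha() else 'x') for c in token}
--     if kinds == {'d'}:
--         return "entero"
--     if kinds == {'a'}:
--         return "palabra"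
--     if {'d', 'a'} <= kinds:
--         return "compuesta"
--     return "otro"
-- ===== Notes on version B (the rewrite author's own statement) =====
-- stated objective: alternative
-- what changed: B maps each character to a kind tag ('d'/'a'/'x'), collects the set of kinds present, and classifies by set equality/subset tests on that set, instead of A's four whole-string scans (isdigit, isalpha, two any() comprehensions).
import Mathlib
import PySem

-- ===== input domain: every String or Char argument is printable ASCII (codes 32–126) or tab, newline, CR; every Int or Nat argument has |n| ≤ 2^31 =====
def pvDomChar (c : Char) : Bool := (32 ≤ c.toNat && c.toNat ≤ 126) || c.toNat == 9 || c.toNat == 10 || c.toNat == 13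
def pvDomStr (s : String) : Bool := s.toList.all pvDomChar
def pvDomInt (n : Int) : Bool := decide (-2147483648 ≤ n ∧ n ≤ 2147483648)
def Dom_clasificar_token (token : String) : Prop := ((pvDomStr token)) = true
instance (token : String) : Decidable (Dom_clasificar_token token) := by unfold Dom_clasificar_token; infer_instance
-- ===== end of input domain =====

-- B classifies via the set of per-character kind tags ('d'/'a'/'x') instead of A's four whole-string scans (alternative decomposition, same cost).

-- ===== PORT A =====
def clasificar_token (token : String) : String :=
  if PySem.Str.strIsdigit token then "entero"
  else if PySem.Str.strIsalpha token then "palabra"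
  else if token.toList.any PySem.Chars.isalpha && token.toList.any PySem.Chars.isdigit then "compuesta"
  else "otro"

-- ===== PORT B =====
-- the per-character kind tag of Source B's set comprehension
def kindOf (c : Char) : Char :=
  if PySem.Chars.isdigit c then 'd' else if PySem.Chars.isalpha c then 'a' else 'x'

def clasificar_token_alt (token : String) : String :=
  let kinds : PySem.Set Char := PySem.Set.ofList (token.toList.map kindOf)
  if PySem.Set.equal kinds (PySem.Set.ofList ['d']) then "entero"
  else if PySem.Set.equal kinds (PySem.Set.ofList ['a']) then "palabra"
  else if PySem.Set.issubset (PySem.Set.ofList ['d', 'a']) kinds then "compuesta"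
  else "otro"

-- ===== PRECONDITION & SPEC =====
def Spec_clasificar_token (token : String) (out : String) : Prop := out = clasificar_token_alt token
instance (token : String) (out : String) : Decidable (Spec_clasificar_token token out) := by unfold Spec_clasificar_token; infer_instance

-- ===== CLAIM (what is proved, stated in full; the proofs are below) =====
def Claim_equal_clasificar_token : Prop := ∀ (token : String), Dom_clasificar_token token → Spec_clasificar_token token (clasificar_token token)

-- ===== LEMMAS AND PROOFS =====
theorem isalpha_of_isdigit (c : Char) (h : PySem.Chars.isdigit c = true) :
    PySem.Chars.isalpha c = false := by
  simp only [PySem.Chars.isdigit, PySem.Chars.isalpha, PySem.Chars.isupper, PySem.Chars.islower,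
    Bool.and_eq_true, decide_eq_true_eq, Char.le_def, UInt32.le_iff_toNat_le] at *
  simp only [Bool.or_eq_false_iff, Bool.and_eq_false_iff, decide_eq_false_iff_not]
  have h0 : ('0').val.toNat = 48 := rfl
  have h9 : ('9').val.toNat = 57 := rfl
  have hA : ('A').val.toNat = 65 := rfl
  have hZ : ('Z').val.toNat = 90 := rfl
  have ha : ('a').val.toNat = 97 := rfl
  have hz : ('z').val.toNat = 122 := rfl
  omega

theorem kindOf_eq_d (c : Char) : kindOf c = 'd' ↔ PySem.Chars.isdigit c = true := by
  unfold kindOf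
  split_ifs with h1 h2 <;> simp_all

theorem kindOf_eq_a (c : Char) : kindOf c = 'a' ↔ PySem.Chars.isalpha c = true := by
  unfold kindOf
  split_ifs with h1 h2 <;> simp_all [isalpha_of_isdigit c]

theorem cond_d (l : List Char) :
    PySem.Set.equal (PySem.Set.ofList (l.map kindOf)) (PySem.Set.ofList ['d']) =
      (!l.isEmpty && l.all PySem.Chars.isdigit) := by
  rw [Bool.eq_iff_iff]
  simp only [PySem.Set.equal_iff, PySem.Set.mem_ofList, List.mem_map, List.mem_singleton,
    Bool.and_eq_true, Bool.not_eq_eq_eq_not, Bool.not_true, List.isEmpty_eq_false_iff,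
    List.all_eq_true]
  constructor
  · intro h
    have hd : ∃ c ∈ l, kindOf c = 'd' := (h 'd').mpr rfl
    obtain ⟨c, hc, _⟩ := hd
    refine ⟨?_, fun c hc => ?_⟩
    · rintro rfl; cases hc
    exact (kindOf_eq_d c).mp ((h (kindOf c)).mp ⟨c, hc, rfl⟩)
  · rintro ⟨hne, hall⟩ x
    constructor
    · rintro ⟨c, hc, rfl⟩; exact (kindOf_eq_d c).mpr (hall c hc)
    · rintro rfl
      obtain ⟨c, hc⟩ := List.exists_mem_of_ne_nil l hne
      exact ⟨c, hc, (kindOf_eq_d c).mpr (hall c hc)⟩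

theorem cond_a (l : List Char) :
    PySem.Set.equal (PySem.Set.ofList (l.map kindOf)) (PySem.Set.ofList ['a']) =
      (!l.isEmpty && l.all PySem.Chars.isalpha) := by
  rw [Bool.eq_iff_iff]
  simp only [PySem.Set.equal_iff, PySem.Set.mem_ofList, List.mem_map, List.mem_singleton,
    Bool.and_eq_true, Bool.not_eq_eq_eq_not, Bool.not_true, List.isEmpty_eq_false_iff,
    List.all_eq_true]
  constructor
  · intro h
    have ha : ∃ c ∈ l, kindOf c = 'a' := (h 'a').mpr rfl
    obtain ⟨c, hc, _⟩ := ha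
    refine ⟨?_, fun c hc => ?_⟩
    · rintro rfl; cases hc
    exact (kindOf_eq_a c).mp ((h (kindOf c)).mp ⟨c, hc, rfl⟩)
  · rintro ⟨hne, hall⟩ x
    constructor
    · rintro ⟨c, hc, rfl⟩; exact (kindOf_eq_a c).mpr (hall c hc)
    · rintro rfl
      obtain ⟨c, hc⟩ := List.exists_mem_of_ne_nil l hne
      exact ⟨c, hc, (kindOf_eq_a c).mpr (hall c hc)⟩

theorem cond_da (l : List Char) :
    PySem.Set.issubset (PySem.Set.ofList ['d', 'a']) (PySem.Set.ofList (l.map kindOf)) =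
      (l.any PySem.Chars.isalpha && l.any PySem.Chars.isdigit) := by
  rw [Bool.eq_iff_iff]
  simp only [PySem.Set.issubset_iff, PySem.Set.mem_ofList, List.mem_map, Bool.and_eq_true,
    List.any_eq_true, List.mem_cons]
  constructor
  · intro h
    obtain ⟨cd, hcd, hkd⟩ := h 'd' (Or.inl rfl)
    obtain ⟨ca, hca, hka⟩ := h 'a' (Or.inr (Or.inl rfl))
    exact ⟨⟨ca, hca, (kindOf_eq_a ca).mp hka⟩, ⟨cd, hcd, (kindOf_eq_d cd).mp hkd⟩⟩
  · rintro ⟨⟨ca, hca, ha⟩, ⟨cd, hcd, hd⟩⟩ x hx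
    rcases hx with rfl | rfl | h
    · exact ⟨cd, hcd, (kindOf_eq_d cd).mpr hd⟩
    · exact ⟨ca, hca, (kindOf_eq_a ca).mpr ha⟩
    · cases h

-- ===== VERDICT (by name: the statement is the Claim_ definition above) =====
theorem clasificar_token_spec : Claim_equal_clasificar_token := by
  intro token _
  unfold Spec_clasificar_token clasificar_token clasificar_token_alt
  simp only [PySem.Str.strIsdigit_eq, PySem.Str.strIsalpha_eq, PySem.Chars.strIsdigit,
    PySem.Chars.strIsalpha, cond_d, cond_a, cond_da]
  rfl
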